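-- pv_equiv track=rewrite | github.com/guystern26/Query-Tester | packages/query-tester/stage/bin/spl/spl_analyzer.py | _strip_subsearch_bodies
-- ===== SOURCE A (Python) =====
-- def _strip_subsearch_bodies(spl: str) -> str:
--     parts = []  # type: List[str]
--     depth = 0
--     for char in spl:
--         if char == "[":
--             depth += 1
--             continue
--         if char == "]" and depth > 0:
--             depth -= 1
--             continue
--         if depth == 0:
--             parts.append(char)
--     return "".join(parts)
-- ===== SOURCE B (Python) =====
-- def _strip_subsearch_bodies(spl: str) -> str:
--     parts = []
--     depth = 0
--     start = 0
--     for i, ch in enumerate(spl):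
--         if ch == "[":
--             if depth == 0:
--                 parts.append(spl[start:i])
--             depth += 1
--         elif ch == "]" and depth > 0:
--             depth -= 1
--             if depth == 0:
--                 start = i + 1
--     if depth == 0:
--         parts.append(spl[start:])
--     return "".join(parts)
-- ===== Notes on version B (the rewrite author's own statement) =====
-- stated objective: alternative
-- what changed: B collects whole top-level substrings by slicing between bracket spans (start index + depth, one slice per kept span) instead of filtering and appending character by character.
import Mathlib
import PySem

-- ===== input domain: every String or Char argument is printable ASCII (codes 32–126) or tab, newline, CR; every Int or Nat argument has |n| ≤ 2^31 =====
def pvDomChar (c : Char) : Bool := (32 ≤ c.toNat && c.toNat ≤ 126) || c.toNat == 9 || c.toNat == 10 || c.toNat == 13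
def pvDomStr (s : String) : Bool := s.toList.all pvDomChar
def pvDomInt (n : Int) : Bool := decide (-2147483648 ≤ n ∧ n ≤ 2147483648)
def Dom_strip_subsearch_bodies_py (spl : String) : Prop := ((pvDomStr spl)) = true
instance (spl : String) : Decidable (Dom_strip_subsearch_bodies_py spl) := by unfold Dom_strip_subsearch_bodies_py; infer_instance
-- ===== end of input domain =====

-- B collects whole top-level substrings by slicing between bracket spans instead of filtering character by character; same O(n) cost, different decomposition.


-- ===== PORT A =====
-- the for-loop over the characters, carrying depth; kept characters are returned in order
def stripGoA : List Char → Nat → List Char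
  | [], _ => []
  | c :: cs, depth =>
    if c = '[' then stripGoA cs (depth + 1)
    else if c = ']' ∧ 0 < depth then stripGoA cs (depth - 1)
    else if depth = 0 then c :: stripGoA cs depth
    else stripGoA cs depth

def strip_subsearch_bodies_py (spl : String) : String :=
  String.ofList (stripGoA spl.toList 0)

-- ===== PORT B =====
-- one step of Source B's loop body: state = (parts, depth, start), p = (i, ch)
def stripStepB (full : List Char) (st : List (List Char) × Nat × Int) (p : Int × Char) :
    List (List Char) × Nat × Int :=
  let (parts, depth, start) := st
  let (i, c) := p
  if c = '[' then
    ((if depth = 0 then parts ++ [PySem.List.slice full (some start) (some i)] else parts),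
     depth + 1, start)
  else if c = ']' ∧ 0 < depth then
    (parts, depth - 1, if depth - 1 = 0 then i + 1 else start)
  else st

def strip_subsearch_bodies_py_alt (spl : String) : String :=
  let full := spl.toList
  let st := (PySem.List.enumerate full 0).foldl (stripStepB full) ([], 0, (0 : Int))
  String.ofList
    (List.flatten
      (if st.2.1 = 0 then st.1 ++ [PySem.List.slice full (some st.2.2) none] else st.1))

-- ===== PRECONDITION & SPEC =====
def Spec_strip_subsearch_bodies_py (spl : String) (out : String) : Prop := out = strip_subsearch_bodies_py_alt spl
instance (spl : String) (out : String) : Decidable (Spec_strip_subsearch_bodies_py spl out) := by unfold Spec_strip_subsearch_bodies_py; infer_instance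

-- ===== CLAIM (what is proved, stated in full; the proofs are below) =====
def Claim_equal_strip_subsearch_bodies_py : Prop := ∀ (spl : String), Dom_strip_subsearch_bodies_py spl → Spec_strip_subsearch_bodies_py spl (strip_subsearch_bodies_py spl)

-- ===== LEMMAS AND PROOFS =====

-- B's fold over the tail of the enumeration, then the final conditional slice append, flattened
def bFinish (full : List Char) (st : List (List Char) × Nat × Int) : List Char :=
  List.flatten (if st.2.1 = 0 then st.1 ++ [PySem.List.slice full (some st.2.2) none] else st.1)

def bRun (full : List Char) (cs : List Char) (i : Int) (st : List (List Char) × Nat × Int) :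
    List (List Char) × Nat × Int :=
  (PySem.List.enumerate cs i).foldl (stripStepB full) st

theorem bRun_nil (full : List Char) (i : Int) (st : List (List Char) × Nat × Int) :
    bRun full [] i st = st := rfl

theorem bRun_cons (full : List Char) (c : Char) (cs : List Char) (i : Int)
    (st : List (List Char) × Nat × Int) :
    bRun full (c :: cs) i st = bRun full cs (i + 1) (stripStepB full st (i, c)) := by
  simp [bRun, PySem.List.enumerate_cons]

theorem take_extend (full : List Char) (s n : Nat) (hs : s ≤ n) (hn : n < full.length) :
    (full.drop s).take (n + 1 - s) = (full.drop s).take (n - s) ++ [full[n]] := by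
  have h1 : n + 1 - s = (n - s) + 1 := by omega
  rw [h1, List.take_add_one]
  have h2 : (full.drop s)[n - s]? = some full[n] := by
    rw [List.getElem?_drop]
    have : s + (n - s) = n := by omega
    rw [this, List.getElem?_eq_getElem hn]
  simp [h2]

-- the main invariant, both depth cases at once
theorem bRun_invariant (full : List Char) :
    ∀ (cs pre : List Char), full = pre ++ cs →
    ∀ (parts : List (List Char)) (depth s : Nat), (depth = 0 → s ≤ pre.length) →
    bFinish full (bRun full cs (pre.length : Int) (parts, depth, ((s : Nat) : Int))) =
      (if depth = 0 then
        parts.flatten ++ (full.drop s).take (pre.length - s) ++ stripGoA cs depth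
      else parts.flatten ++ stripGoA cs depth) := by
  intro cs
  induction cs with
  | nil =>
    intro pre hfull parts depth s hs
    simp only [bRun_nil, bFinish, stripGoA]
    by_cases hd : depth = 0
    · subst hd
      simp only [if_pos rfl, if_true]
      rw [PySem.List.slice_from_natCast]
      have hle : (List.drop s full).length ≤ pre.length - s := by simp [hfull]
      simp [List.take_of_length_le hle, List.flatten_append]
    · simp [hd]
  | cons c cs ih =>
    intro pre hfull parts depth s hs
    have hlen : pre.length < full.length := by simp [hfull]
    have hget : full[pre.length]'hlen = c := by
      subst hfull
      simp [List.getElem_append_right (Nat.le_refl pre.length)]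
    have hfull' : full = (pre ++ [c]) ++ cs := by simp [hfull]
    have hlen' : ((pre ++ [c]).length : Int) = (pre.length : Int) + 1 := by simp
    have hlenn : (pre ++ [c]).length = pre.length + 1 := by simp
    rw [bRun_cons]
    by_cases hc : c = '['
    · -- '[' : maybe flush a slice, depth+1
      by_cases hd : depth = 0
      · subst hd
        simp only [stripStepB, if_pos rfl, if_pos hc, if_true]
        have hslice : PySem.List.slice full (some ((s : Nat) : Int)) (some ((pre.length : Nat) : Int))
            = (full.drop s).take (pre.length - s) := PySem.List.slice_natCast full s pre.length
        have h1 := ih (pre ++ [c]) hfull' (parts ++ [(full.drop s).take (pre.length - s)]) 1 s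
          (by intro h; omega)
        rw [hlen'] at h1
        simp only [if_neg (Nat.one_ne_zero)] at h1
        simp only [hslice]
        rw [h1]
        simp [stripGoA, hc, List.flatten_append]
      · simp only [stripStepB, if_neg hd, if_pos hc]
        have h1 := ih (pre ++ [c]) hfull' parts (depth + 1) s (by intro h; omega)
        rw [hlen'] at h1
        have hd1 : ¬ (depth + 1 = 0) := by omega
        simp only [if_neg hd1] at h1
        rw [h1]
        simp [stripGoA, hc, hd]
    · by_cases hcd : c = ']' ∧ 0 < depth
      · -- ']' at positive depth : depth-1, maybe reset start
        obtain ⟨hc', hdpos⟩ := hcd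
        have hd : ¬ (depth = 0) := by omega
        simp only [stripStepB, if_neg (show ¬ c = '[' from hc), if_pos (And.intro hc' hdpos)]
        by_cases hd1 : depth - 1 = 0
        · -- returns to depth 0: start := i+1
          have hstart : (pre.length : Int) + 1 = (((pre ++ [c]).length : Nat) : Int) := by simp
          have h1 := ih (pre ++ [c]) hfull' parts 0 (pre ++ [c]).length (by intro _; omega)
          simp only [if_pos rfl, if_true, Nat.sub_self, List.take_zero, List.append_nil] at h1
          simp only [hd1, if_pos rfl, if_true, hstart]
          rw [h1]
          simp only [if_neg hd, stripGoA, if_neg (show ¬ c = '[' from hc),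
            if_pos (And.intro hc' hdpos), hd1]
        · have h1 := ih (pre ++ [c]) hfull' parts (depth - 1) s (by intro h; omega)
          rw [hlen'] at h1
          simp only [if_neg hd1] at h1 ⊢
          rw [h1]
          simp only [if_neg hd, stripGoA, if_neg (show ¬ c = '[' from hc),
            if_pos (And.intro hc' hdpos)]
      · -- ordinary character (or ']' at depth 0): state unchanged; A keeps it iff depth = 0
        simp only [stripStepB, if_neg (show ¬ c = '[' from hc), if_neg hcd]
        by_cases hd : depth = 0
        · subst hd
          have h1 := ih (pre ++ [c]) hfull' parts 0 s (by intro _; simp; omega)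
          rw [hlen'] at h1
          simp only [if_pos rfl, if_true, hlenn] at h1
          simp only [if_pos rfl, if_true]
          rw [h1, take_extend full s pre.length (hs rfl) hlen, hget]
          simp [stripGoA, hc]
        · have h1 := ih (pre ++ [c]) hfull' parts depth s (by intro h; omega)
          rw [hlen'] at h1
          simp only [if_neg hd] at h1 ⊢
          rw [h1]
          simp [stripGoA, hc, hcd, hd]

-- ===== VERDICT (by name: the statement is the Claim_ definition above) =====
theorem strip_subsearch_bodies_py_spec : Claim_equal_strip_subsearch_bodies_py := by
  intro spl _
  unfold Spec_strip_subsearch_bodies_py strip_subsearch_bodies_py strip_subsearch_bodies_py_alt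
  have h := bRun_invariant spl.toList spl.toList [] rfl [] 0 0 (by intro _; omega)
  simp only [List.length_nil, Nat.cast_zero, if_true, List.flatten_nil,
    List.nil_append, List.drop_zero, Nat.sub_zero, List.take_zero] at h
  rw [bRun, bFinish] at h
  simp only [] at h ⊢
  rw [h]
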